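-- pv_equiv track=rewrite | github.com/abhishek776/TwinCodeSimulation | Decoding.py | is_decodable
-- ===== SOURCE A (Python) =====
-- def is_decodable(list_of_matrices):
--
-- 	"""
-- 	Checks if all the items have been decoded.
-- 	"""
-- 	def all_true(found):
-- 		for item in found:
-- 			if not item:
-- 				return False
-- 		return True
--
-- 	if len(list_of_matrices) == 0:
-- 		return False
--
-- 	size = len(list_of_matrices[0])**2
-- 	element_connections = [[] for x in range(0,size)]
-- 	list_connections = [[] for x in range(0,len(list_of_matrices))]
-- 	found = [False for x in range(0,size)]
--
--
-- 	"""
-- 	This part of the code creates lists on the element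
-- 	side and on the list side in order to run the algorithm
-- 	to test whether it is decodable.
-- 	"""
-- 	index = 0
-- 	while index < len(list_of_matrices):
-- 		matrix = list_of_matrices[index]
-- 		for i in range(0, len(matrix)):
-- 			for j in range(0, len(matrix)):
-- 				checked = matrix[i][j]
-- 				if(checked):
-- 					element_num = i*len(matrix) + j
-- 					list_connections[index].append(element_num)
-- 					element_connections[element_num].append(index)
-- 		index = index + 1;
--
-- 	"""
-- 	This part of the code uses the list created in the previous section
-- 	to test if this combination of matrices is decodable.
-- 	"""
-- 	while not all_true(found):
-- 		hasChanged = False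
-- 		for lis in list_connections:
-- 			if len(lis) == 1:
-- 				element_index = lis[0]
-- 				found[element_index] = True
-- 				to_delete = element_connections[element_index]
-- 				for index in to_delete:
-- 					list_connections[index].remove(element_index)
-- 				hasChanged = True
-- 		if not hasChanged:
-- 			return False
-- 	return True
-- ===== SOURCE B (Python) =====
-- def is_decodable(list_of_matrices):
--     """Worklist peeling: a list is processed once exactly one of its
--     elements is still unresolved (instead of rescanning all lists)."""
--     if len(list_of_matrices) == 0:
--         return False
--     size = len(list_of_matrices[0]) ** 2
--     elem_to_lists = [[] for _ in range(size)]
--     list_elems = []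
--     for lidx, m in enumerate(list_of_matrices):
--         n = len(m)
--         elems = []
--         for i in range(n):
--             for j in range(n):
--                 if m[i][j]:
--                     e = i * n + j
--                     elems.append(e)
--                     elem_to_lists[e].append(lidx)
--         list_elems.append(elems)
--     remaining = [len(es) for es in list_elems]
--     found = [False] * size
--     found_count = 0
--     stack = [l for l in range(len(list_elems)) if remaining[l] == 1]
--     while stack:
--         l = stack.pop()
--         if remaining[l] != 1:
--             continue
--         e = next(x for x in list_elems[l] if not found[x])
--         found[e] = True
--         found_count += 1
--         for l2 in elem_to_lists[e]:
--             remaining[l2] -= 1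
--             if remaining[l2] == 1:
--                 stack.append(l2)
--     return found_count == size
-- ===== Notes on version B (the rewrite author's own statement) =====
-- stated objective: alternative
-- what changed: A repeatedly rescans every list (and rescans found after each pass) until a full pass changes nothing; B replaces the rescan passes with a worklist/stack of lists whose unresolved-element count has hit 1, maintaining per-list counters so lists are only revisited when an incident element is resolved.
import Mathlib
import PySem

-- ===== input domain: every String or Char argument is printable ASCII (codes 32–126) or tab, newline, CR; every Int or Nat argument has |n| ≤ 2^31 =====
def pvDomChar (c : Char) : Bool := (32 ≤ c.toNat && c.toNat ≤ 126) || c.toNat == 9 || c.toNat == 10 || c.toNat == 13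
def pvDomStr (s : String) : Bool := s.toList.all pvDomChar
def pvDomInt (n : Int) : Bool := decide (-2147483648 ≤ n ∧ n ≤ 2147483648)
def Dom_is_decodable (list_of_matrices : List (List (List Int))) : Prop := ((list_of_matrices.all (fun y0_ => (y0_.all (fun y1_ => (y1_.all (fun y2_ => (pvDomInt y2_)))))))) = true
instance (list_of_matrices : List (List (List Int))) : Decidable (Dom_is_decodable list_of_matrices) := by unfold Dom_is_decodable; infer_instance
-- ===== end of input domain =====

-- B replaces A's repeated full rescans by a worklist (stack) of lists whose count of
-- unresolved elements has reached 1; same return value, different algorithm.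

-- ===== PORT A =====
-- one cell (i,j) of matrix `m` (list index `idx`): if truthy, append the element
-- number to list_connections[idx] and `idx` to element_connections[element]
def aCell (m : List (List Int)) (idx : Nat)
    (st : List (List Nat) × List (List Nat)) (i j : Nat) :
    List (List Nat) × List (List Nat) :=
  if (m.getD i []).getD j 0 ≠ 0 then
    (st.1.modify idx (· ++ [i * m.length + j]),
     st.2.modify (i * m.length + j) (· ++ [idx]))
  else st

-- the two nested `for` loops over one matrix
def aBuildMat (m : List (List Int)) (idx : Nat)
    (st : List (List Nat) × List (List Nat)) :
    List (List Nat) × List (List Nat) :=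
  (List.range m.length).foldl
    (fun st i => (List.range m.length).foldl (fun st j => aCell m idx st i j) st) st

-- the `while index < len(list_of_matrices)` build loop
def aBuild (lom : List (List (List Int))) (size : Nat) :
    List (List Nat) × List (List Nat) :=
  (List.range lom.length).foldl
    (fun st idx => aBuildMat (lom.getD idx []) idx st)
    (List.replicate lom.length [], List.replicate size [])

def aAllTrue (found : List Bool) : Bool := found.all (fun b => b)

-- one iteration of `for lis in list_connections` (by index, reading the current state)
def aStep (ec : List (List Nat))
    (st : List (List Nat) × List Bool × Bool) (k : Nat) :
    List (List Nat) × List Bool × Bool :=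
  let lis := st.1.getD k []
  if lis.length == 1 then
    let e := lis.getD 0 0
    ((ec.getD e []).foldl (fun lc idx => lc.modify idx (fun L => L.erase e)) st.1,
     st.2.1.set e true, true)
  else st

def aPass (ec : List (List Nat)) (lc : List (List Nat)) (found : List Bool) :
    List (List Nat) × List Bool × Bool :=
  (List.range lc.length).foldl (aStep ec) (lc, found, false)

-- the `while not all_true(found)` loop; the fuel only makes the recursion total
-- (each pass that changes anything marks one more element found, so size+1 suffices)
def aLoop (ec : List (List Nat)) : Nat → List (List Nat) → List Bool → Bool
  | 0, _, _ => false
  | fuel + 1, lc, found =>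
    if aAllTrue found then true
    else
      let st := aPass ec lc found
      if st.2.2 then aLoop ec fuel st.1 st.2.1 else false

def is_decodable (list_of_matrices : List (List (List Int))) : Bool :=
  if list_of_matrices.length == 0 then false
  else
    let size := (list_of_matrices.getD 0 []).length ^ 2
    let st := aBuild list_of_matrices size
    aLoop st.2 (size + 1) st.1 (List.replicate size false)

-- ===== PORT B =====
def bCell (m : List (List Int)) (lidx : Nat)
    (st : List Nat × List (List Nat)) (i j : Nat) :
    List Nat × List (List Nat) :=
  if (m.getD i []).getD j 0 ≠ 0 then
    (st.1 ++ [i * m.length + j],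
     st.2.modify (i * m.length + j) (· ++ [lidx]))
  else st

def bBuildMat (m : List (List Int)) (lidx : Nat) (ec : List (List Nat)) :
    List Nat × List (List Nat) :=
  (List.range m.length).foldl
    (fun st i => (List.range m.length).foldl (fun st j => bCell m lidx st i j) st) ([], ec)

-- `for lidx, m in enumerate(list_of_matrices)` building list_elems / elem_to_lists
def bBuild (lom : List (List (List Int))) (size : Nat) :
    List (List Nat) × List (List Nat) :=
  (List.range lom.length).foldl
    (fun st lidx =>
      let r := bBuildMat (lom.getD lidx []) lidx st.2
      (st.1 ++ [r.1], r.2))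
    ([], List.replicate size [])

-- termination helper for bLoop (cited by its decreasing_by)
theorem count_false_set_true (found : List Bool) (e : Nat)
    (he : e < found.length) (hf : found[e] = false) :
    (found.set e true).count false < found.count false := by
  have h1 : (found.set e true).count false + 1 ≤ found.count false := by
    induction found generalizing e with
    | nil => simp at he
    | cons x xs ih =>
      cases e with
      | zero => simp_all [List.count_cons]
      | succ n =>
        simp only [List.set_cons_succ, List.count_cons]
        have := ih n (by simpa using he) (by simpa using hf)
        split <;> omega
  omega

-- the `while stack:` worklist; the stack is held top-first (Python pops from the end).
-- The `none` branch (Python's next() raising StopIteration) is unreachable under Pre_.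
def bLoop (le ec : List (List Nat)) (remaining : List Nat) (found : List Bool)
    (fc : Nat) (stack : List Nat) : Nat :=
  match stack with
  | [] => fc
  | l :: rest =>
    if remaining.getD l 0 ≠ 1 then bLoop le ec remaining found fc rest
    else
      match h : (le.getD l []).find? (fun x => found.getD x true == false) with
      | none => bLoop le ec remaining found fc rest
      | some e =>
        let found' := found.set e true
        let st := (ec.getD e []).foldl
          (fun (st : List Nat × List Nat) l2 =>
            let r := st.1.modify l2 (· - 1)
            if r.getD l2 0 == 1 then (r, l2 :: st.2) else (r, st.2))
          (remaining, rest)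
        bLoop le ec st.1 found' (fc + 1) st.2
termination_by (found.count false, stack.length)
decreasing_by
  · exact Prod.Lex.right _ (by simp)
  · exact Prod.Lex.right _ (by simp)
  · apply Prod.Lex.left
    have hp := List.find?_some h
    have he : e < found.length := by
      by_contra hlt
      rw [List.getD_eq_default] at hp
      · simp at hp
      · omega
    have hf : found[e] = false := by
      have := hp
      rw [List.getD_eq_getElem _ _ he] at this
      simpa using this
    exact count_false_set_true found e he hf

def is_decodable_alt (list_of_matrices : List (List (List Int))) : Bool :=
  if list_of_matrices.length == 0 then false
  else
    let size := (list_of_matrices.getD 0 []).length ^ 2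
    let st := bBuild list_of_matrices size
    let remaining := st.1.map List.length
    let stack := ((List.range st.1.length).filter (fun l => remaining.getD l 0 == 1)).reverse
    bLoop st.1 st.2 remaining (List.replicate size false) 0 stack == size

-- ===== PRECONDITION & SPEC =====
-- Pre_ excludes exactly the inputs on which A raises IndexError: a matrix row shorter
-- than the matrix, or a truthy entry whose element number i*n+j falls outside the
-- 0..len(first matrix)^2 range of the `found`/`element_connections` arrays.
def Pre_is_decodable (list_of_matrices : List (List (List Int))) : Prop :=
  ∀ m ∈ list_of_matrices,
    (∀ i < m.length, m.length ≤ (m.getD i []).length) ∧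
    (∀ i < m.length, ∀ j < m.length, (m.getD i []).getD j 0 ≠ 0 →
      i * m.length + j < (list_of_matrices.getD 0 []).length ^ 2)
instance (list_of_matrices : List (List (List Int))) : Decidable (Pre_is_decodable list_of_matrices) := by
  unfold Pre_is_decodable; infer_instance

def pvWitness_is_decodable : List (List (List Int)) := [[[1, 0], [1, 1]], [[0, 0], [0, 1]], [[1, 0], [0, 0]]]

def Spec_is_decodable (list_of_matrices : List (List (List Int))) (out : Bool) : Prop := out = is_decodable_alt list_of_matrices
instance (list_of_matrices : List (List (List Int))) (out : Bool) : Decidable (Spec_is_decodable list_of_matrices out) := by unfold Spec_is_decodable; infer_instance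

-- ===== CLAIM (what is proved, stated in full; the proofs are below) =====
def Claim_equal_is_decodable : Prop := ∀ (list_of_matrices : List (List (List Int))), Dom_is_decodable list_of_matrices → Pre_is_decodable list_of_matrices → Spec_is_decodable list_of_matrices (is_decodable list_of_matrices)

-- ===== LEMMAS AND PROOFS =====

-- ---- generic list lemmas ----
theorem getD_modify_ne {α : Type} (xs : List α) (f : α → α) (i j : Nat) (d : α) (h : i ≠ j) :
    (xs.modify i f).getD j d = xs.getD j d := by
  by_cases hj : j < xs.length
  · rw [List.getD_eq_getElem _ _ (by simpa [List.length_modify] using hj),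
      List.getD_eq_getElem _ _ hj, List.getElem_modify]
    simp [h]
  · rw [List.getD_eq_default _ _ (by simpa [List.length_modify] using hj),
      List.getD_eq_default _ _ (by omega)]

theorem getD_modify_self {α : Type} (xs : List α) (f : α → α) (j : Nat) (d : α)
    (h : j < xs.length) :
    (xs.modify j f).getD j d = f (xs.getD j d) := by
  rw [List.getD_eq_getElem _ _ (by simpa [List.length_modify] using h),
    List.getD_eq_getElem _ _ h, List.getElem_modify]
  simp

theorem foldl_modify_length {α : Type} (h : Nat → α → α) (idxs : List Nat) (xs : List α) :
    (idxs.foldl (fun ys i => ys.modify i (h i)) xs).length = xs.length := by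
  induction idxs generalizing xs with
  | nil => rfl
  | cons i t ih => simp [List.foldl_cons, ih, List.length_modify]

theorem foldl_modify_getD {α : Type} (h : Nat → α → α) (idxs : List Nat) (xs : List α)
    (d : α) (l : Nat) (hl : l < xs.length) :
    (idxs.foldl (fun ys i => ys.modify i (h i)) xs).getD l d
      = (h l)^[idxs.count l] (xs.getD l d) := by
  induction idxs generalizing xs with
  | nil => rfl
  | cons i t ih =>
    simp only [List.foldl_cons]
    rcases eq_or_ne i l with rfl | hne
    · rw [ih _ (by simpa [List.length_modify] using hl), getD_modify_self _ _ _ _ hl,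
        List.count_cons_self, Function.iterate_succ_apply]
    · rw [ih _ (by simpa [List.length_modify] using hl), getD_modify_ne _ _ _ _ _ hne,
        List.count_cons_of_ne (by omega)]

theorem modify_modify {α : Type} (l : List α) (i : Nat) (f g : α → α) :
    (l.modify i g).modify i f = l.modify i (fun x => f (g x)) := by
  apply List.ext_getElem
  · simp [List.length_modify]
  · intro j h1 h2
    rw [List.getElem_modify, List.getElem_modify, List.getElem_modify]
    split <;> simp_all

theorem iterate_pred (n k : Nat) : (fun x => x - 1)^[k] n = n - k := by
  induction k generalizing n with
  | zero => rfl
  | succ k ih => rw [Function.iterate_succ_apply, ih]; omega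

theorem filter_ne_erase (M : List Nat) (e : Nat) :
    (M.erase e).filter (fun x => !(x == e)) = M.filter (fun x => !(x == e)) := by
  induction M with
  | nil => rfl
  | cons a t ih =>
    rw [List.erase_cons]
    by_cases h : a = e
    · simp [h]
    · simp [h, List.filter_cons, ih]

theorem erase_iterate (M : List Nat) (e : Nat) :
    (fun L => L.erase e)^[M.count e] M = M.filter (fun x => !(x == e)) := by
  generalize hc : M.count e = c
  induction c generalizing M with
  | zero =>
    have : e ∉ M := List.count_eq_zero.mp hc
    rw [Function.iterate_zero_apply, List.filter_eq_self.mpr]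
    intro a ha
    simp only [Bool.not_eq_eq_eq_not, Bool.not_true, beq_eq_false_iff_ne]
    exact fun h => this (h ▸ ha)
  | succ k ih =>
    have hm : e ∈ M := List.count_pos_iff.mp (by omega)
    rw [Function.iterate_succ_apply, ← filter_ne_erase M e]
    exact ih _ (by rw [List.count_erase_self, hc]; omega)

theorem count_true_set (found : List Bool) (e : Nat)
    (he : e < found.length) (hf : found[e] = false) :
    (found.set e true).count true = found.count true + 1 := by
  induction found generalizing e with
  | nil => simp at he
  | cons x xs ih =>
    cases e with
    | zero => simp_all [List.count_cons]
    | succ n =>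
      simp only [List.set_cons_succ, List.count_cons]
      have := ih n (by simpa using he) (by simpa using hf)
      split <;> omega

theorem length_filter_ne (M : List Nat) (e : Nat) :
    (M.filter (fun x => !(x == e))).length + M.count e = M.length := by
  induction M with
  | nil => rfl
  | cons a t ih =>
    by_cases h : a = e
    · simp [h, List.filter_cons, List.count_cons]; omega
    · simp [h, List.filter_cons, List.count_cons]; omega

-- ---- the peeling closure: an element is peelable if some list contains it exactly
-- once and all its other elements are peelable ----
def foundF (found : List Bool) (x : Nat) : Bool := found.getD x false

def rem1 (found : List Bool) (L : List Nat) : List Nat :=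
  L.filter (fun x => !foundF found x)

inductive Peel (conns : List (List Nat)) : Nat → Prop
  | step (l e : Nat) (hl : l < conns.length)
      (hc : (conns.getD l []).count e = 1)
      (hr : ∀ x ∈ conns.getD l [], x ≠ e → Peel conns x) : Peel conns e

theorem foundF_set (found : List Bool) (e : Nat) (x : Nat) (he : e < found.length) :
    foundF (found.set e true) x = ((x == e) || foundF found x) := by
  unfold foundF
  rcases eq_or_ne x e with rfl | hne
  · rw [List.getD_eq_getElem _ _ (by simpa using he), List.getElem_set_self (by simpa using he)]
    simp
  · by_cases hx : x < found.length
    · rw [List.getD_eq_getElem _ _ (by simpa using hx), List.getD_eq_getElem _ _ hx,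
        List.getElem_set_ne (Ne.symm hne)]
      simp [hne]
    · rw [List.getD_eq_default _ _ (by simpa using (by omega : found.length ≤ x)),
        List.getD_eq_default _ _ (by omega)]
      simp [hne]

theorem rem1_set (found : List Bool) (L : List Nat) (e : Nat) (he : e < found.length) :
    rem1 (found.set e true) L = (rem1 found L).filter (fun x => !(x == e)) := by
  unfold rem1
  rw [List.filter_filter]
  apply List.filter_congr
  intro x _
  rw [foundF_set found e x he]
  cases h1 : (x == e) <;> cases h2 : foundF found x <;> simp

theorem rem1_singleton {found : List Bool} {L : List Nat} {e : Nat}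
    (h : rem1 found L = [e]) :
    L.count e = 1 ∧ foundF found e = false ∧
      (∀ x ∈ L, x ≠ e → foundF found x = true) := by
  have hmem : e ∈ rem1 found L := by rw [h]; exact List.mem_singleton_self e
  have he : foundF found e = false := by
    have := List.of_mem_filter hmem
    simpa using this
  refine ⟨?_, he, ?_⟩
  · have : L.count e = (rem1 found L).count e := by
      unfold rem1
      rw [List.count_filter (by simp [he])]
    rw [this, h]; simp
  · intro x hx hne
    by_contra hfx
    have : x ∈ rem1 found L :=
      List.mem_filter.mpr ⟨hx, by simp [Bool.eq_false_iff.mpr hfx]⟩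
    rw [h] at this
    exact hne (by simpa using this)

theorem rem1_length_of_unfound {found : List Bool} {L : List Nat} {e : Nat}
    (he : foundF found e = false) (hothers : ∀ x ∈ L, x ≠ e → foundF found x = true) :
    (rem1 found L).length = L.count e := by
  unfold rem1
  rw [← List.countP_eq_length_filter]
  unfold List.count
  apply List.countP_congr
  intro x hx
  rcases eq_or_ne x e with rfl | hne
  · simp [he]
  · simp [hothers x hx hne, hne]

theorem closed_peel {conns : List (List Nat)} {found : List Bool}
    (hcl : ∀ l < conns.length, (rem1 found (conns.getD l [])).length ≠ 1) :
    ∀ e, Peel conns e → foundF found e = true := by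
  intro e hp
  induction hp with
  | step l e hl hc hr ih =>
    by_contra hfe
    have hfe' : foundF found e = false := Bool.eq_false_iff.mpr hfe
    have : (rem1 found (conns.getD l [])).length = 1 := by
      rw [rem1_length_of_unfound hfe' (fun x hx hne => ih x hx hne), hc]
    exact hcl l hl this

theorem find?_of_filter_singleton {L : List Nat} {p q : Nat → Bool} {e : Nat}
    (hpq : ∀ x ∈ L, p x = q x) (h : L.filter q = [e]) : L.find? p = some e := by
  induction L with
  | nil => simp at h
  | cons a t ih =>
    rw [List.filter_cons] at h
    by_cases hq : q a = true
    · rw [if_pos hq] at h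
      obtain ⟨rfl, ht⟩ : a = e ∧ t.filter q = [] := by
        have := List.cons_eq_cons.mp h; tauto
      rw [List.find?_cons_of_pos (by rw [hpq a (by simp)]; exact hq)]
    · rw [if_neg hq] at h
      rw [List.find?_cons_of_neg (by rw [hpq a (by simp)]; exact hq)]
      exact ih (fun x hx => hpq x (by simp [hx])) h

theorem foundF_replicate (size x : Nat) : foundF (List.replicate size false) x = false := by
  unfold foundF
  by_cases hx : x < size
  · rw [List.getD_eq_getElem _ _ (by simpa using hx)]; simp
  · rw [List.getD_eq_default _ _ (by simpa using (by omega : size ≤ x))]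

theorem rem1_replicate (size : Nat) (L : List Nat) :
    rem1 (List.replicate size false) L = L := by
  unfold rem1
  apply List.filter_eq_self.mpr
  intro a _
  simp [foundF_replicate]

-- ---- A-side: invariants of the rescan loop ----
def HltP (conns : List (List Nat)) (size : Nat) : Prop :=
  ∀ l < conns.length, ∀ x ∈ conns.getD l [], x < size

def ECokP (conns ec : List (List Nat)) : Prop :=
  (∀ e l : Nat, (ec.getD e []).count l = (conns.getD l []).count e) ∧
  (∀ e l : Nat, l ∈ ec.getD e [] → l < conns.length)

def InvA (conns : List (List Nat)) (size : Nat) (lc : List (List Nat)) (found : List Bool) : Prop :=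
  lc.length = conns.length ∧ found.length = size ∧
  (∀ l < conns.length, lc.getD l [] = rem1 found (conns.getD l [])) ∧
  (∀ e, foundF found e = true → Peel conns e)

theorem aStep_of_len_ne {ec : List (List Nat)} {st : List (List Nat) × List Bool × Bool}
    {k : Nat} (h : (st.1.getD k []).length ≠ 1) : aStep ec st k = st := by
  simp only [aStep]
  rw [if_neg (by simpa using h)]

theorem aStep_changed {conns ec : List (List Nat)} {size : Nat}
    {st : List (List Nat) × List Bool × Bool} {k : Nat}
    (hE : ECokP conns ec) (hH : HltP conns size)
    (hI : InvA conns size st.1 st.2.1)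
    (hk : (st.1.getD k []).length = 1) :
    InvA conns size (aStep ec st k).1 (aStep ec st k).2.1 ∧
    (aStep ec st k).2.1.count false < st.2.1.count false ∧
    (aStep ec st k).2.2 = true := by
  obtain ⟨lc, found, c⟩ := st
  simp only [] at hI hk ⊢
  have hkl : k < lc.length := by
    by_contra h
    rw [List.getD_eq_default _ _ (by omega)] at hk
    simp at hk
  obtain ⟨hlen, hflen, hlc, hpeel⟩ := hI
  have hkc : k < conns.length := hlen ▸ hkl
  obtain ⟨e0, he0⟩ := List.length_eq_one_iff.mp hk
  have hsing : rem1 found (conns.getD k []) = [e0] := by rw [← hlc k hkc, he0]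
  obtain ⟨hcnt, hunf, hoth⟩ := rem1_singleton hsing
  have hmem : e0 ∈ conns.getD k [] := List.count_pos_iff.mp (by omega)
  have hesz : e0 < size := hH k hkc e0 hmem
  have heflen : e0 < found.length := by omega
  have hPeel : Peel conns e0 :=
    Peel.step k e0 hkc hcnt (fun x hx hne => hpeel x (hoth x hx hne))
  have hgete : found[e0] = false := by
    have := hunf
    unfold foundF at this
    rwa [List.getD_eq_getElem _ _ heflen] at this
  have hst : aStep ec (lc, found, c) k =
      ((ec.getD e0 []).foldl (fun lc idx => lc.modify idx (fun L => L.erase e0)) lc,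
        found.set e0 true, true) := by
    simp only [aStep, he0]
    rw [if_pos (by simp)]
    rfl
  rw [hst]
  refine ⟨⟨?_, by simpa using hflen, ?_, ?_⟩, ?_, rfl⟩
  · have hh := foldl_modify_length (fun (_ : Nat) (L : List Nat) => L.erase e0) (ec.getD e0 []) lc
    simp only [] at hh
    dsimp only
    rw [hh]
    exact hlen
  · intro l hl
    have hllc : l < lc.length := by omega
    have hh := foldl_modify_getD (fun (_ : Nat) (L : List Nat) => L.erase e0) (ec.getD e0 []) lc [] l hllc
    simp only [] at hh
    dsimp only
    rw [hh, hE.1 e0 l, hlc l hl]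
    have hcf : (conns.getD l []).count e0 = (rem1 found (conns.getD l [])).count e0 := by
      unfold rem1
      rw [List.count_filter (by simp [hunf])]
    rw [hcf, erase_iterate, rem1_set found _ e0 heflen]
  · intro x hx
    rw [foundF_set found e0 x heflen] at hx
    rcases Bool.or_eq_true_iff.mp hx with h | h
    · exact (by simpa using h : x = e0) ▸ hPeel
    · exact hpeel x h
  · exact count_false_set_true found e0 heflen hgete

theorem aStep_flag_true {ec : List (List Nat)} {st : List (List Nat) × List Bool × Bool}
    {k : Nat} (h : st.2.2 = true) : (aStep ec st k).2.2 = true := by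
  by_cases hk : (st.1.getD k []).length = 1
  · simp only [aStep]
    rw [if_pos (by simpa using hk)]
  · rw [aStep_of_len_ne hk]; exact h

theorem aFold_flag_mono {ec : List (List Nat)} (ks : List Nat)
    (st : List (List Nat) × List Bool × Bool) (h : st.2.2 = true) :
    (ks.foldl (aStep ec) st).2.2 = true := by
  induction ks generalizing st with
  | nil => exact h
  | cons k t ih => exact ih _ (aStep_flag_true h)

theorem aFold_inv {conns ec : List (List Nat)} {size : Nat}
    (hE : ECokP conns ec) (hH : HltP conns size) (ks : List Nat)
    (st : List (List Nat) × List Bool × Bool)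
    (hI : InvA conns size st.1 st.2.1) :
    InvA conns size (ks.foldl (aStep ec) st).1 (ks.foldl (aStep ec) st).2.1 ∧
    ((ks.foldl (aStep ec) st).2.1.count false ≤ st.2.1.count false) ∧
    (ks.foldl (aStep ec) st = st ∨
      ((ks.foldl (aStep ec) st).2.2 = true ∧
        (ks.foldl (aStep ec) st).2.1.count false < st.2.1.count false)) := by
  induction ks generalizing st with
  | nil => exact ⟨hI, le_refl _, Or.inl rfl⟩
  | cons k t ih =>
    simp only [List.foldl_cons]
    by_cases hk : (st.1.getD k []).length = 1
    · obtain ⟨hI', hlt, hflag⟩ := aStep_changed hE hH hI hk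
      obtain ⟨ih1, ih2, ih3⟩ := ih _ hI'
      refine ⟨ih1, by omega, Or.inr ⟨?_, by omega⟩⟩
      rcases ih3 with h | h
      · rw [h]; exact hflag
      · exact h.1
    · rw [aStep_of_len_ne hk]
      exact ih st hI

theorem aFold_flag_false {ec : List (List Nat)} (ks : List Nat)
    (st : List (List Nat) × List Bool × Bool)
    (h : (ks.foldl (aStep ec) st).2.2 = false) :
    ks.foldl (aStep ec) st = st ∧ ∀ k ∈ ks, (st.1.getD k []).length ≠ 1 := by
  induction ks generalizing st with
  | nil => exact ⟨rfl, by simp⟩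
  | cons k t ih =>
    simp only [List.foldl_cons] at h ⊢
    by_cases hk : (st.1.getD k []).length = 1
    · exfalso
      have : (aStep ec st k).2.2 = true := by
        simp only [aStep]
        rw [if_pos (by simpa using hk)]
      rw [aFold_flag_mono t _ this] at h
      exact absurd h (by decide)
    · rw [aStep_of_len_ne hk] at h ⊢
      obtain ⟨h1, h2⟩ := ih st h
      refine ⟨h1, ?_⟩
      intro k' hk'
      rcases List.mem_cons.mp hk' with rfl | hk'
      · exact hk
      · exact h2 k' hk'

theorem aLoop_correct {conns ec : List (List Nat)} {size : Nat}
    (hE : ECokP conns ec) (hH : HltP conns size) :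
    ∀ (fuel : Nat) (lc : List (List Nat)) (found : List Bool),
      InvA conns size lc found → found.count false < fuel →
      (aLoop ec fuel lc found = true ↔ ∀ e < size, Peel conns e) := by
  intro fuel
  induction fuel with
  | zero => intro lc found _ hf; omega
  | succ fuel ih =>
    intro lc found hI hf
    have hflen : found.length = size := hI.2.1
    have hlclen : lc.length = conns.length := hI.1
    by_cases hall : aAllTrue found = true
    · have hR : ∀ e < size, Peel conns e := by
        intro e he
        apply hI.2.2.2
        have heL : e < found.length := by omega
        unfold foundF
        rw [List.getD_eq_getElem _ _ heL]
        exact List.all_eq_true.mp hall _ (List.getElem_mem heL)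
      have hT : aLoop ec (fuel + 1) lc found = true := by
        unfold aLoop
        rw [if_pos hall]
      rw [hT]
      exact iff_of_true rfl hR
    · -- some element is still unfound
      obtain ⟨b, hb, hbf⟩ : ∃ b ∈ found, b = false := by
        by_contra hc
        push_neg at hc
        apply hall
        apply List.all_eq_true.mpr
        intro b hbm
        cases b
        · exact absurd rfl (hc false hbm)
        · rfl
      obtain ⟨i, hi, hif⟩ := List.mem_iff_getElem.mp hb
      have hisize : i < size := by omega
      have hfoundFi : foundF found i = false := by
        unfold foundF
        rw [List.getD_eq_getElem _ _ hi, hif]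
        exact hbf
      have hpass := aFold_inv hE hH (List.range lc.length) (lc, found, false) hI
      rcases hpass.2.2 with hsame | hchanged
      · -- unchanged pass: the loop returns false and some element is not peelable
        have hff : ((List.range lc.length).foldl (aStep ec) (lc, found, false)).2.2 = false := by
          rw [hsame]
        obtain ⟨_, hnos⟩ := aFold_flag_false _ _ hff
        have hclosed : ∀ l < conns.length, (rem1 found (conns.getD l [])).length ≠ 1 := by
          intro l hl
          rw [← hI.2.2.1 l hl]
          exact hnos l (List.mem_range.mpr (by omega : l < lc.length))
        have hnP : ¬ Peel conns i := fun hp => by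
          rw [closed_peel hclosed i hp] at hfoundFi
          exact absurd hfoundFi (by decide)
        have hL : aLoop ec (fuel + 1) lc found = false := by
          unfold aLoop
          rw [if_neg hall]
          simp only [aPass]
          rw [hsame]
          rfl
        rw [hL]
        simp only [Bool.false_eq_true, false_iff]
        intro hR
        exact hnP (hR i hisize)
      · -- something changed: recurse
        have hL : aLoop ec (fuel + 1) lc found
            = aLoop ec fuel ((aPass ec lc found).1) ((aPass ec lc found).2.1) := by
          conv_lhs => unfold aLoop
          rw [if_neg hall]
          simp only [aPass]
          rw [if_pos hchanged.1]
        rw [hL]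
        refine ih _ _ ?_ ?_
        · have := hpass.1
          simpa only [aPass] using this
        · have h2 := hchanged.2
          dsimp only at h2
          simp only [aPass]
          omega

-- ---- B-side: invariants of the worklist loop ----
def bDecStep : List Nat × List Nat → Nat → List Nat × List Nat :=
  fun st l2 =>
    let r := st.1.modify l2 (· - 1)
    if r.getD l2 0 == 1 then (r, l2 :: st.2) else (r, st.2)

theorem bFold_fst (ecE : List Nat) (r s : List Nat) :
    (ecE.foldl bDecStep (r, s)).1
      = ecE.foldl (fun r l2 => r.modify l2 (fun x => x - 1)) r := by
  induction ecE generalizing r s with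
  | nil => rfl
  | cons l2 t ih =>
    simp only [List.foldl_cons, bDecStep]
    split
    · exact ih _ _
    · exact ih _ _

theorem bFold_inv (ecE : List Nat) (r s : List Nat) :
    (∀ x ∈ s, x ∈ (ecE.foldl bDecStep (r, s)).2) ∧
    (∀ x ∈ (ecE.foldl bDecStep (r, s)).2, x ∈ s ∨ x ∈ ecE) ∧
    (∀ l0, (ecE.foldl bDecStep (r, s)).1.getD l0 0 = 1 →
      l0 ∈ (ecE.foldl bDecStep (r, s)).2 ∨ (ecE.count l0 = 0 ∧ r.getD l0 0 = 1)) := by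
  induction ecE generalizing r s with
  | nil => exact ⟨fun x hx => hx, fun x hx => Or.inl hx, fun l0 h => Or.inr ⟨rfl, h⟩⟩
  | cons l2 t ih =>
    simp only [List.foldl_cons, bDecStep]
    split
    case isTrue h1 =>
      obtain ⟨ih1, ih2, ih3⟩ := ih (r.modify l2 (· - 1)) (l2 :: s)
      refine ⟨fun x hx => ih1 x (by simp [hx]), ?_, ?_⟩
      · intro x hx
        rcases ih2 x hx with hx' | hx'
        · rcases List.mem_cons.mp hx' with rfl | hx''
          · exact Or.inr (by simp)
          · exact Or.inl hx''
        · exact Or.inr (by simp [hx'])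
      · intro l0 h
        rcases ih3 l0 h with h' | ⟨hc, hr⟩
        · exact Or.inl h'
        · rcases eq_or_ne l0 l2 with rfl | hne
          · exact Or.inl (ih1 l0 (by simp))
          · rw [getD_modify_ne _ _ _ _ _ (Ne.symm hne)] at hr
            exact Or.inr ⟨by rw [List.count_cons_of_ne (by omega)]; exact hc, hr⟩
    case isFalse h1 =>
      obtain ⟨ih1, ih2, ih3⟩ := ih (r.modify l2 (· - 1)) s
      refine ⟨ih1, ?_, ?_⟩
      · intro x hx
        rcases ih2 x hx with hx' | hx'
        · exact Or.inl hx'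
        · exact Or.inr (by simp [hx'])
      · intro l0 h
        rcases ih3 l0 h with h' | ⟨hc, hr⟩
        · exact Or.inl h'
        · rcases eq_or_ne l0 l2 with rfl | hne
          · exact absurd (by simpa using hr) h1
          · rw [getD_modify_ne _ _ _ _ _ (Ne.symm hne)] at hr
            exact Or.inr ⟨by rw [List.count_cons_of_ne (by omega)]; exact hc, hr⟩

def InvB (conns ec : List (List Nat)) (size : Nat) (remaining : List Nat)
    (found : List Bool) (fc : Nat) (stack : List Nat) : Prop :=
  found.length = size ∧ remaining.length = conns.length ∧
  (∀ l < conns.length, remaining.getD l 0 = (rem1 found (conns.getD l [])).length) ∧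
  (∀ e, foundF found e = true → Peel conns e) ∧
  fc = found.count true ∧
  (∀ l < conns.length, remaining.getD l 0 = 1 → l ∈ stack) ∧
  (∀ l ∈ stack, l < conns.length)

theorem bNext_inv {conns ec : List (List Nat)} {size : Nat}
    {remaining : List Nat} {found : List Bool} {fc l : Nat} {rest : List Nat} {e : Nat}
    (hE : ECokP conns ec) (hH : HltP conns size)
    (hI : InvB conns ec size remaining found fc (l :: rest))
    (h1 : remaining.getD l 0 = 1)
    (hfind : (conns.getD l []).find? (fun x => found.getD x true == false) = some e) :
    InvB conns ec size ((ec.getD e []).foldl bDecStep (remaining, rest)).1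
      (found.set e true) (fc + 1) ((ec.getD e []).foldl bDecStep (remaining, rest)).2 := by
  obtain ⟨hflen, hrlen, hrem, hpeel, hfc, hsing, hmem⟩ := hI
  have hl : l < conns.length := hmem l (by simp)
  have hlen1 : (rem1 found (conns.getD l [])).length = 1 := by rw [← hrem l hl]; exact h1
  obtain ⟨e0, he0⟩ := List.length_eq_one_iff.mp hlen1
  have hpq : ∀ x ∈ conns.getD l [], (found.getD x true == false) = (!foundF found x) := by
    intro x hx
    have hxs : x < size := hH l hl x hx
    unfold foundF
    rw [List.getD_eq_getElem _ _ (by omega), List.getD_eq_getElem _ _ (by omega)]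
    cases found[x] <;> simp
  have hee : e = e0 := by
    have := find?_of_filter_singleton hpq he0
    rw [hfind] at this
    exact (Option.some_inj.mp this)
  subst hee
  obtain ⟨hcnt, hunf, hoth⟩ := rem1_singleton he0
  have hin : e ∈ conns.getD l [] := List.count_pos_iff.mp (by omega)
  have hesz : e < size := hH l hl e hin
  have heflen : e < found.length := by omega
  have hgete : found[e] = false := by
    have := hunf
    unfold foundF at this
    rwa [List.getD_eq_getElem _ _ heflen] at this
  have hPeel : Peel conns e :=
    Peel.step l e hl hcnt (fun x hx hne2 => hpeel x (hoth x hx hne2))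
  have hstfst : ((ec.getD e []).foldl bDecStep (remaining, rest)).1
      = (ec.getD e []).foldl (fun r l2 => r.modify l2 (fun x => x - 1)) remaining :=
    bFold_fst _ _ _
  have hrlen' : ((ec.getD e []).foldl bDecStep (remaining, rest)).1.length = conns.length := by
    rw [hstfst]
    have := foldl_modify_length (fun (_ : Nat) (x : Nat) => x - 1) (ec.getD e []) remaining
    simp only [] at this
    rw [this]
    exact hrlen
  have hget' : ∀ l0, l0 < conns.length →
      ((ec.getD e []).foldl bDecStep (remaining, rest)).1.getD l0 0
        = remaining.getD l0 0 - ((conns.getD l0 []).count e) := by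
    intro l0 hl0
    rw [hstfst]
    have hh := foldl_modify_getD (fun (_ : Nat) (x : Nat) => x - 1) (ec.getD e []) remaining 0 l0 (by omega)
    simp only [] at hh
    rw [hh, iterate_pred, hE.1 e l0]
  obtain ⟨hb1, hb2, hb3⟩ := bFold_inv (ec.getD e []) remaining rest
  refine ⟨by simpa using hflen, hrlen', ?_, ?_, ?_, ?_, ?_⟩
  · intro l0 hl0
    rw [hget' l0 hl0, hrem l0 hl0, rem1_set found _ e heflen]
    have hfl := length_filter_ne (rem1 found (conns.getD l0 [])) e
    have hce : (rem1 found (conns.getD l0 [])).count e = (conns.getD l0 []).count e := by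
      unfold rem1
      rw [List.count_filter (by simp [hunf])]
    omega
  · intro x hx
    rw [foundF_set found e x heflen] at hx
    rcases Bool.or_eq_true_iff.mp hx with h | h
    · exact (by simpa using h : x = e) ▸ hPeel
    · exact hpeel x h
  · rw [count_true_set found e heflen hgete, hfc]
  · intro l0 hl0 h1'
    rcases hb3 l0 h1' with h' | ⟨hc0, hr1⟩
    · exact h'
    · have hml0 : l0 ∈ l :: rest := hsing l0 hl0 hr1
      rcases List.mem_cons.mp hml0 with rfl | hmem'
      · exfalso
        rw [hE.1 e l0] at hc0
        omega
      · exact hb1 l0 hmem'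
  · intro x hx
    rcases hb2 x hx with h' | h'
    · exact hmem x (by simp [h'])
    · exact hE.2 e x h'

theorem bLoop_correct :
    ∀ (conns ec : List (List Nat)) (size : Nat) (remaining : List Nat)
      (found : List Bool) (fc : Nat) (stack : List Nat),
      ECokP conns ec → HltP conns size →
      InvB conns ec size remaining found fc stack →
      (bLoop conns ec remaining found fc stack = size ↔ ∀ e < size, Peel conns e) := by
  intro conns ec size remaining found fc stack
  induction remaining, found, fc, stack using bLoop.induct (le := conns) (ec := ec) with
  | case1 remaining found fc =>
    intro hE hH hI
    obtain ⟨hflen, hrlen, hrem, hpeel, hfc, hsing, hmem⟩ := hI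
    rw [bLoop]
    constructor
    · intro hsz e he
      apply hpeel
      have : found.count true = found.length := by omega
      have hall := List.count_eq_length.mp this
      unfold foundF
      rw [List.getD_eq_getElem _ _ (by omega)]
      exact (hall _ (List.getElem_mem (by omega))).symm
    · intro hR
      have hclosed : ∀ l < conns.length, (rem1 found (conns.getD l [])).length ≠ 1 := by
        intro l hl hc
        exact absurd (hsing l hl (by rw [hrem l hl]; exact hc)) (List.not_mem_nil)
      have hallf : ∀ b ∈ found, true = b := by
        intro b hb
        obtain ⟨i, hi, hif⟩ := List.mem_iff_getElem.mp hb
        have : foundF found i = true :=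
          closed_peel hclosed i (hR i (by omega))
        unfold foundF at this
        rw [List.getD_eq_getElem _ _ hi, hif] at this
        exact this.symm
      have := List.count_eq_length.mpr hallf
      omega
  | case2 remaining found fc l rest hne ih =>
    intro hE hH hI
    obtain ⟨hflen, hrlen, hrem, hpeel, hfc, hsing, hmem⟩ := hI
    rw [bLoop]
    rw [if_pos hne]
    apply ih hE hH
    refine ⟨hflen, hrlen, hrem, hpeel, hfc, ?_, fun x hx => hmem x (by simp [hx])⟩
    intro l0 hl0 h1
    rcases List.mem_cons.mp (hsing l0 hl0 h1) with rfl | h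
    · exact absurd h1 hne
    · exact h
  | case3 remaining found fc l rest hne hfind ih =>
    intro hE hH hI
    exfalso
    obtain ⟨hflen, hrlen, hrem, hpeel, hfc, hsing, hmem⟩ := hI
    have hl : l < conns.length := hmem l (by simp)
    have h1 : remaining.getD l 0 = 1 := not_ne_iff.mp hne
    have hlen1 : (rem1 found (conns.getD l [])).length = 1 := by rw [← hrem l hl]; exact h1
    obtain ⟨e0, he0⟩ := List.length_eq_one_iff.mp hlen1
    have hmem0 : e0 ∈ rem1 found (conns.getD l []) := by rw [he0]; simp
    have hin : e0 ∈ conns.getD l [] := List.mem_of_mem_filter hmem0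
    have hunf : foundF found e0 = false := by simpa using List.of_mem_filter hmem0
    have hsz : e0 < size := hH l hl e0 hin
    have := List.find?_eq_none.mp hfind e0 hin
    apply this
    unfold foundF at hunf
    rw [List.getD_eq_getElem _ _ (by omega)] at hunf ⊢
    simp [hunf]
  | case4 remaining found fc l rest hne e hfind found2 st2 ih =>
    intro hE hH hI
    have h1 : remaining.getD l 0 = 1 := not_ne_iff.mp hne
    have hInv := bNext_inv hE hH hI h1 hfind
    rw [bLoop]
    rw [if_neg hne]
    split
    next heq => rw [heq] at hfind; exact absurd hfind (by simp)
    next e' heq =>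
      rw [heq] at hfind
      obtain rfl : e' = e := Option.some_inj.mp hfind
      exact ih hE hH hInv

-- ---- build phase: both ports construct the same incidence structure ----
def pairsL (n : Nat) : List (Nat × Nat) :=
  (List.range n).flatMap (fun i => (List.range n).map (fun j => (i, j)))

def cellsOf (m : List (List Int)) (P : List (Nat × Nat)) : List Nat :=
  P.filterMap (fun p => if (m.getD p.1 []).getD p.2 0 ≠ 0 then some (p.1 * m.length + p.2) else none)

def cells (m : List (List Int)) : List Nat := cellsOf m (pairsL m.length)

def ecAdd (idx : Nat) (es : List Nat) (ec : List (List Nat)) : List (List Nat) :=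
  es.foldl (fun ec e => ec.modify e (fun L => L ++ [idx])) ec

def ecAll (lom : List (List (List Int))) (size : Nat) : List (List Nat) :=
  (List.range lom.length).foldl (fun ec l => ecAdd l (cells (lom.getD l [])) ec)
    (List.replicate size [])

def connsOf (lom : List (List (List Int))) : List (List Nat) :=
  (List.range lom.length).map (fun l => cells (lom.getD l []))

theorem foldl_range2 {σ : Type} (n : Nat) (g : σ → Nat → Nat → σ) (st : σ) :
    (List.range n).foldl (fun st i => (List.range n).foldl (fun st j => g st i j) st) st
      = (pairsL n).foldl (fun st p => g st p.1 p.2) st := by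
  unfold pairsL
  rw [List.foldl_flatMap]
  simp only [List.foldl_map]

theorem bPairs_fold (m : List (List Int)) (lidx : Nat) (P : List (Nat × Nat))
    (es : List Nat) (ec : List (List Nat)) :
    P.foldl (fun st p => bCell m lidx st p.1 p.2) (es, ec)
      = (es ++ cellsOf m P, ecAdd lidx (cellsOf m P) ec) := by
  induction P generalizing es ec with
  | nil => simp [cellsOf, ecAdd]
  | cons p t ih =>
    simp only [List.foldl_cons]
    by_cases h : (m.getD p.1 []).getD p.2 0 ≠ 0
    · have hb : bCell m lidx (es, ec) p.1 p.2
          = (es ++ [p.1 * m.length + p.2], ec.modify (p.1 * m.length + p.2) (fun L => L ++ [lidx])) := by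
        unfold bCell
        rw [if_pos h]
      have hc : cellsOf m (p :: t) = (p.1 * m.length + p.2) :: cellsOf m t := by
        unfold cellsOf
        rw [List.filterMap_cons, if_pos h]
      rw [hb, ih, hc]
      refine congrArg₂ Prod.mk ?_ rfl
      rw [← List.append_cons]
    · have hb : bCell m lidx (es, ec) p.1 p.2 = (es, ec) := by
        unfold bCell
        rw [if_neg h]
      have hc : cellsOf m (p :: t) = cellsOf m t := by
        unfold cellsOf
        rw [List.filterMap_cons, if_neg h]
      rw [hb, ih, hc]

theorem aPairs_fold (m : List (List Int)) (idx : Nat) (P : List (Nat × Nat))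
    (lc ec : List (List Nat)) :
    P.foldl (fun st p => aCell m idx st p.1 p.2) (lc, ec)
      = (lc.modify idx (fun L => L ++ cellsOf m P), ecAdd idx (cellsOf m P) ec) := by
  induction P generalizing lc ec with
  | nil =>
    simp only [cellsOf, List.filterMap_nil, List.foldl_nil, List.append_nil, ecAdd]
    rw [show (fun L : List Nat => L) = (id : List Nat → List Nat) from rfl, List.modify_id]
  | cons p t ih =>
    simp only [List.foldl_cons]
    by_cases h : (m.getD p.1 []).getD p.2 0 ≠ 0
    · have hb : aCell m idx (lc, ec) p.1 p.2
          = (lc.modify idx (fun L => L ++ [p.1 * m.length + p.2]),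
             ec.modify (p.1 * m.length + p.2) (fun L => L ++ [idx])) := by
        unfold aCell
        rw [if_pos h]
      have hc : cellsOf m (p :: t) = (p.1 * m.length + p.2) :: cellsOf m t := by
        unfold cellsOf
        rw [List.filterMap_cons, if_pos h]
      rw [hb, ih, modify_modify, hc]
      have hfun : (fun x : List Nat => x ++ [p.1 * m.length + p.2] ++ cellsOf m t)
          = (fun L : List Nat => L ++ (p.1 * m.length + p.2) :: cellsOf m t) :=
        funext (fun L => by rw [← List.append_cons])
      rw [hfun]
      exact congrArg₂ Prod.mk rfl rfl
    · have hb : aCell m idx (lc, ec) p.1 p.2 = (lc, ec) := by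
        unfold aCell
        rw [if_neg h]
      have hc : cellsOf m (p :: t) = cellsOf m t := by
        unfold cellsOf
        rw [List.filterMap_cons, if_neg h]
      rw [hb, ih, hc]

theorem bBuildMat_eq (m : List (List Int)) (lidx : Nat) (ec : List (List Nat)) :
    bBuildMat m lidx ec = (cells m, ecAdd lidx (cells m) ec) := by
  unfold bBuildMat
  rw [foldl_range2 m.length (fun st i j => bCell m lidx st i j) ([], ec), bPairs_fold]
  rfl

theorem aBuildMat_eq (m : List (List Int)) (idx : Nat) (lc ec : List (List Nat)) :
    aBuildMat m idx (lc, ec) = (lc.modify idx (fun L => L ++ cells m), ecAdd idx (cells m) ec) := by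
  unfold aBuildMat
  rw [foldl_range2 m.length (fun st i j => aCell m idx st i j) (lc, ec), aPairs_fold]
  rfl

theorem bOuter (lom : List (List (List Int))) (idxs : List Nat)
    (acc : List (List Nat)) (ec : List (List Nat)) :
    idxs.foldl (fun st lidx =>
        (st.1 ++ [(bBuildMat (lom.getD lidx []) lidx st.2).1],
         (bBuildMat (lom.getD lidx []) lidx st.2).2)) (acc, ec)
      = (acc ++ idxs.map (fun l => cells (lom.getD l [])),
         idxs.foldl (fun ec l => ecAdd l (cells (lom.getD l [])) ec) ec) := by
  induction idxs generalizing acc ec with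
  | nil => simp
  | cons i t ih =>
    simp only [List.foldl_cons]
    rw [bBuildMat_eq (lom.getD i []) i ec]
    rw [ih]
    simp only [List.map_cons, List.foldl_cons]
    rw [← List.append_cons]

theorem aOuter (lom : List (List (List Int))) (idxs : List Nat)
    (lc ec : List (List Nat)) :
    idxs.foldl (fun st idx => aBuildMat (lom.getD idx []) idx st) (lc, ec)
      = (idxs.foldl (fun lc idx => lc.modify idx (fun L => L ++ cells (lom.getD idx []))) lc,
         idxs.foldl (fun ec l => ecAdd l (cells (lom.getD l [])) ec) ec) := by
  induction idxs generalizing lc ec with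
  | nil => rfl
  | cons i t ih =>
    simp only [List.foldl_cons]
    rw [show aBuildMat (lom.getD i []) i (lc, ec)
        = (lc.modify i (fun L => L ++ cells (lom.getD i [])), ecAdd i (cells (lom.getD i [])) ec)
      from aBuildMat_eq _ _ _ _]
    exact ih _ _

theorem modify_fold_eq_map (k : Nat) (g : Nat → List Nat) :
    (List.range k).foldl (fun lc idx => lc.modify idx (fun L => L ++ g idx)) (List.replicate k [])
      = (List.range k).map g := by
  have hlen : ((List.range k).foldl (fun lc idx => lc.modify idx (fun L => L ++ g idx))
      (List.replicate k ([] : List Nat))).length = k := by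
    have := foldl_modify_length (fun idx (L : List Nat) => L ++ g idx) (List.range k)
      (List.replicate k [])
    simp only [] at this
    rw [this, List.length_replicate]
  apply List.ext_getElem
  · rw [hlen, List.length_map, List.length_range]
  · intro j h1 h2
    have hj : j < k := by omega
    have hD := foldl_modify_getD (fun idx (L : List Nat) => L ++ g idx) (List.range k)
      (List.replicate k []) [] j (by rw [List.length_replicate]; exact hj)
    simp only [] at hD
    rw [← List.getD_eq_getElem _ [] h1, hD,
      List.count_eq_one_of_mem (List.nodup_range) (List.mem_range.mpr hj),
      List.getD_eq_getElem _ _ (by rw [List.length_replicate]; exact hj)]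
    simp

theorem bBuild_eq (lom : List (List (List Int))) (size : Nat) :
    bBuild lom size = (connsOf lom, ecAll lom size) := by
  unfold bBuild connsOf ecAll
  dsimp only
  rw [bOuter]
  rw [List.nil_append]

theorem aBuild_eq (lom : List (List (List Int))) (size : Nat) :
    aBuild lom size = (connsOf lom, ecAll lom size) := by
  unfold aBuild connsOf ecAll
  rw [aOuter, modify_fold_eq_map]

-- elementwise description of the element→lists table
theorem edge_fold_getD (E : List (Nat × Nat)) (ec : List (List Nat)) (e : Nat)
    (hE : ∀ p ∈ E, p.2 < ec.length) :
    (E.foldl (fun ec p => ec.modify p.2 (fun L => L ++ [p.1])) ec).getD e []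
      = ec.getD e [] ++ (E.filter (fun p => p.2 == e)).map Prod.fst := by
  induction E generalizing ec with
  | nil => simp
  | cons p t ih =>
    simp only [List.foldl_cons, List.filter_cons]
    rcases eq_or_ne p.2 e with heq | hne
    · rw [if_pos (by simpa using heq)]
      rw [ih _ (fun q hq => by rw [List.length_modify]; exact hE q (by simp [hq]))]
      rw [heq, getD_modify_self _ _ _ _ (heq ▸ hE p (by simp))]
      simp
    · rw [if_neg (by simpa using hne)]
      rw [ih _ (fun q hq => by rw [List.length_modify]; exact hE q (by simp [hq]))]
      rw [getD_modify_ne _ _ _ _ _ hne]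

theorem edge_count (idxs : List Nat) (g : Nat → List Nat) (e l : Nat) :
    ((((idxs.flatMap (fun i => (g i).map (fun x => (i, x))))).filter
        (fun p => p.2 == e)).map Prod.fst).count l
      = idxs.count l * (g l).count e := by
  induction idxs with
  | nil => simp
  | cons i t ih =>
    rw [List.flatMap_cons, List.filter_append, List.map_append, List.count_append, ih]
    have hblk : (((g i).map (fun x => (i, x))).filter (fun p => p.2 == e)).map Prod.fst
        = List.replicate ((g i).count e) i := by
      rw [List.filter_map]
      have : ((fun p : Nat × Nat => p.2 == e) ∘ fun x => (i, x)) = (fun x => x == e) := rfl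
      rw [this, List.map_map]
      have : (Prod.fst ∘ fun x : Nat => (i, x)) = (fun _ => i) := rfl
      rw [this, List.map_const']
      congr 1
      rw [List.count, List.countP_eq_length_filter]
    rw [hblk, List.count_replicate]
    rcases eq_or_ne i l with rfl | hne
    · rw [List.count_cons_self, if_pos (show (i == i) = true by simp)]
      ring
    · rw [List.count_cons_of_ne (by omega), if_neg (show ¬ ((i == l) = true) by simp; omega)]
      omega

theorem edge_mem {idxs : List Nat} {g : Nat → List Nat} {e x : Nat}
    (h : x ∈ (((idxs.flatMap (fun i => (g i).map (fun y => (i, y))))).filter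
        (fun p => p.2 == e)).map Prod.fst) : x ∈ idxs := by
  obtain ⟨p, hp, rfl⟩ := List.mem_map.mp h
  have hp2 := List.mem_of_mem_filter hp
  obtain ⟨i, hi, hpi⟩ := List.mem_flatMap.mp hp2
  obtain ⟨y, _, hy⟩ := List.mem_map.mp hpi
  rw [← hy]
  exact hi

theorem ecAll_eq_edges (lom : List (List (List Int))) (size : Nat) :
    ecAll lom size
      = ((List.range lom.length).flatMap
          (fun l => (cells (lom.getD l [])).map (fun e => (l, e)))).foldl
          (fun ec p => ec.modify p.2 (fun L => L ++ [p.1])) (List.replicate size []) := by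
  unfold ecAll
  rw [List.foldl_flatMap]
  simp only [List.foldl_map]
  rfl

theorem connsOf_getD (lom : List (List (List Int))) (l : Nat) (hl : l < lom.length) :
    (connsOf lom).getD l [] = cells (lom.getD l []) := by
  unfold connsOf
  rw [List.getD_eq_getElem _ _ (by simp [hl]), List.getElem_map]
  simp

theorem connsOf_length (lom : List (List (List Int))) :
    (connsOf lom).length = lom.length := by
  simp [connsOf]

theorem cells_lt {lom : List (List (List Int))} (hpre : Pre_is_decodable lom)
    (l : Nat) (hl : l < lom.length) :
    ∀ x ∈ cells (lom.getD l []), x < (lom.getD 0 []).length ^ 2 := by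
  intro x hx
  unfold cells cellsOf at hx
  obtain ⟨p, hp, hif⟩ := List.mem_filterMap.mp hx
  have hm : lom.getD l [] ∈ lom := by
    rw [List.getD_eq_getElem _ _ hl]
    exact List.getElem_mem hl
  unfold pairsL at hp
  obtain ⟨i, hi, hpi⟩ := List.mem_flatMap.mp hp
  obtain ⟨j, hj, rfl⟩ := List.mem_map.mp hpi
  have him : i < (lom.getD l []).length := List.mem_range.mp hi
  have hjm : j < (lom.getD l []).length := List.mem_range.mp hj
  split at hif
  case isTrue hcond =>
    obtain rfl := Option.some_inj.mp hif
    exact (hpre _ hm).2 i him j hjm hcond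
  case isFalse => exact absurd hif (by simp)

theorem hlt_built {lom : List (List (List Int))} (hpre : Pre_is_decodable lom) :
    HltP (connsOf lom) ((lom.getD 0 []).length ^ 2) := by
  intro l hl x hx
  rw [connsOf_length] at hl
  rw [connsOf_getD lom l hl] at hx
  exact cells_lt hpre l hl x hx

theorem ecok_built {lom : List (List (List Int))} (hpre : Pre_is_decodable lom) :
    ECokP (connsOf lom) (ecAll lom ((lom.getD 0 []).length ^ 2)) := by
  have hsz : ∀ p ∈ (List.range lom.length).flatMap
      (fun l => (cells (lom.getD l [])).map (fun e => (l, e))),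
      p.2 < (List.replicate ((lom.getD 0 []).length ^ 2) ([] : List Nat)).length := by
    intro p hp
    obtain ⟨i, hi, hpi⟩ := List.mem_flatMap.mp hp
    obtain ⟨y, hy, hyp⟩ := List.mem_map.mp hpi
    rw [List.length_replicate, ← hyp]
    exact cells_lt hpre i (List.mem_range.mp hi) y hy
  have h0 : ∀ e : Nat, (List.replicate ((lom.getD 0 []).length ^ 2) ([] : List Nat)).getD e [] = [] := by
    intro e
    by_cases he : e < (lom.getD 0 []).length ^ 2
    · rw [List.getD_eq_getElem _ _ (by simpa using he)]
      simp
    · rw [List.getD_eq_default _ _ (by simpa using (by omega : (lom.getD 0 []).length ^ 2 ≤ e))]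
  constructor
  · intro e l
    rw [ecAll_eq_edges, edge_fold_getD _ _ _ hsz, h0, List.nil_append, edge_count]
    by_cases hlk : l < lom.length
    · rw [List.count_eq_one_of_mem List.nodup_range (List.mem_range.mpr hlk), one_mul,
        connsOf_getD lom l hlk]
    · rw [List.count_eq_zero.mpr (fun hml => hlk (List.mem_range.mp hml)), zero_mul,
        List.getD_eq_default _ _ (by rw [connsOf_length]; omega)]
      simp
  · intro e l hl
    rw [ecAll_eq_edges, edge_fold_getD _ _ _ hsz, h0, List.nil_append] at hl
    rw [connsOf_length]
    exact List.mem_range.mp (edge_mem hl)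

-- ===== VERDICT (by name: the statement is the Claim_ definition above) =====
theorem is_decodable_spec : Claim_equal_is_decodable := by
  unfold Claim_equal_is_decodable
  intro lom _ hpre
  unfold Spec_is_decodable
  by_cases h0 : lom.length = 0
  · unfold is_decodable is_decodable_alt
    rw [if_pos (by simpa using h0), if_pos (by simpa using h0)]
  · have h0b : ¬ ((lom.length == 0) = true) := by simpa using h0
    unfold is_decodable is_decodable_alt
    rw [if_neg h0b, if_neg h0b]
    simp only [aBuild_eq, bBuild_eq]
    have hH := hlt_built hpre
    have hE := ecok_built hpre
    have hcnt : (List.replicate ((lom.getD 0 []).length ^ 2) false).count false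
        = (lom.getD 0 []).length ^ 2 := by simp
    have hInvA : InvA (connsOf lom) ((lom.getD 0 []).length ^ 2) (connsOf lom)
        (List.replicate ((lom.getD 0 []).length ^ 2) false) := by
      refine ⟨rfl, List.length_replicate, ?_, ?_⟩
      · intro l hl
        rw [rem1_replicate]
      · intro e he
        rw [foundF_replicate] at he
        exact absurd he (by decide)
    have hA := aLoop_correct hE hH ((lom.getD 0 []).length ^ 2 + 1) (connsOf lom)
      (List.replicate ((lom.getD 0 []).length ^ 2) false) hInvA (by omega)
    have hInvB : InvB (connsOf lom) (ecAll lom ((lom.getD 0 []).length ^ 2))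
        ((lom.getD 0 []).length ^ 2)
        ((connsOf lom).map List.length)
        (List.replicate ((lom.getD 0 []).length ^ 2) false) 0
        (((List.range (connsOf lom).length).filter
          (fun l => ((connsOf lom).map List.length).getD l 0 == 1)).reverse) := by
      refine ⟨List.length_replicate, by simp, ?_, ?_, by simp [List.count_replicate], ?_, ?_⟩
      · intro l hl
        rw [rem1_replicate,
          List.getD_eq_getElem _ _ (by simpa using hl), List.getElem_map,
          List.getD_eq_getElem _ _ hl]
      · intro e he
        rw [foundF_replicate] at he
        exact absurd he (by decide)
      · intro l hl h1
        rw [List.mem_reverse]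
        exact List.mem_filter.mpr ⟨List.mem_range.mpr hl, beq_iff_eq.mpr h1⟩
      · intro x hx
        rw [List.mem_reverse] at hx
        exact List.mem_range.mp (List.mem_filter.mp hx).1
    have hB := bLoop_correct (connsOf lom) (ecAll lom ((lom.getD 0 []).length ^ 2))
      ((lom.getD 0 []).length ^ 2)
      ((connsOf lom).map List.length)
      (List.replicate ((lom.getD 0 []).length ^ 2) false) 0
      (((List.range (connsOf lom).length).filter
        (fun l => ((connsOf lom).map List.length).getD l 0 == 1)).reverse) hE hH hInvB
    refine Bool.eq_iff_iff.mpr ?_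
    constructor
    · intro hL
      exact beq_iff_eq.mpr (hB.mpr (hA.mp hL))
    · intro hR
      exact hA.mpr (hB.mp (beq_iff_eq.mp hR))
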